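-- pv_equiv track=rewrite | github.com/gav989/mpdf2 | scripts/utilities/sf.py | sftonum
-- ===== SOURCE A (Python) =====
-- def sftonum(num,power):
-- 	from math import floor,log10,ceil
-- 	if num=="0":
-- 		result = "0"
-- 	else:
-- 		while num.find(".")!=-1 and num[-1:]=="0":
-- 			num = num[:-1]
-- 		if num[-1:]==".":
-- 			num = num[:-1]
-- 		while num[0]=="0" and num[1]!=".":
-- 			num = num[1:]
-- 		if power==0:
-- 			result = "\\num{" + num + "}"
-- 		elif power>0:
-- 			if num.find(".")==-1:
-- 				result = "\\num{" + num + "0"*power + "}"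
-- 			else:
-- 				pointpos = num.find(".")
-- 				prepoint = num[:pointpos]
-- 				postpoint = num[-(len(num)-pointpos-1):]
-- 				if power==len(postpoint):
-- 					result = "\\num{" + prepoint + postpoint + "}"
-- 				elif power>len(postpoint):
-- 					power = power - len(postpoint)
-- 					result = "\\num{" + prepoint + postpoint + "0"*power + "}"
-- 				else:
-- 					prepoint = prepoint + postpoint[:power]
-- 					postpoint = postpoint[-(len(postpoint)-power):]
-- 					result = "\\num{" + prepoint + "." + postpoint + "}"
-- 		else:
-- 			power = abs(power)
-- 			if num.find(".")==-1:
-- 				if power==len(num):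
-- 					result = "\\num{0." + num + "}"
-- 				elif power>len(num):
-- 					result = "\\num{0." + "0"*(power-len(num)) + num + "}"
-- 				else:
-- 					prepoint = num[:(len(num)-power)]
-- 					postpoint = num[-power:]
-- 					result = "\\num{" + prepoint + "." + postpoint + "}"
-- 			else:
-- 				pointpos = num.find(".")
-- 				prepoint = num[:pointpos]
-- 				postpoint = num[-(len(num)-pointpos-1):]
-- 				if power==len(prepoint):
--
-- 					result = "\\num{0." + prepoint + postpoint + "}"
-- 				elif power>len(prepoint):
-- 					power = power-len(prepoint)
-- 					result = "\\num{0." + "0"*power + prepoint + postpoint + "}"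
-- 				else:
-- 					postpoint = prepoint[-power:] + postpoint
-- 					prepoint = prepoint[:len(prepoint)-power]
-- 					result = "\\num{" + prepoint + "." + postpoint + "}"
-- 	return result
-- ===== SOURCE B (Python) =====
-- def sftonum(num, power):
--     # Same cleaning phase as the original; then one decimal-position computation
--     # replaces the six-way power/length case analysis.
--     if num == "0":
--         return "0"
--     while num.find(".") != -1 and num[-1:] == "0":
--         num = num[:-1]
--     if num[-1:] == ".":
--         num = num[:-1]
--     while num[0] == "0" and num[1] != ".":
--         num = num[1:]
--     if power == 0:
--         return "\\num{" + num + "}"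
--     dot = num.find(".")
--     if dot == -1:
--         prepoint, postpoint = num, ""
--     else:
--         prepoint, postpoint = num[:dot], num[dot + 1:]
--     digits = prepoint + postpoint
--     newpos = len(prepoint) + power
--     if newpos >= len(digits):
--         body = digits + "0" * (newpos - len(digits))
--     elif newpos <= 0:
--         body = "0." + "0" * (-newpos) + digits
--     else:
--         body = digits[:newpos] + "." + digits[newpos:]
--     return "\\num{" + body + "}"
-- ===== Notes on version B (the rewrite author's own statement) =====
-- stated objective: simpler
-- what changed: The six-way power-vs-length case analysis (positive/negative power crossed with dot/no-dot and three length comparisons each) is replaced by a single decimal-position computation: digits = prepoint+postpoint, newpos = len(prepoint)+power, and three uniform emit cases (pad right, pad left with '0.', or split digits at newpos); the cleaning phase is kept.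
-- intended difference: On strings whose first '.' is the last character after cleaning (i.e. num is a dot-free prefix followed by '..' then trailing zeros, e.g. '1..') with power != 0, A's negative slice num[-(0):] wraps to the whole string so A duplicates the digits and keeps stray dots (A('1..',1) = '\num{11..}'), while B treats the text after the first dot as the fraction part and returns '\num{10}', the intended decimal shift. — e.g. on sftonum("1..", 1): A returns "\\num{11..}", B returns "\\num{10}"
import Mathlib
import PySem

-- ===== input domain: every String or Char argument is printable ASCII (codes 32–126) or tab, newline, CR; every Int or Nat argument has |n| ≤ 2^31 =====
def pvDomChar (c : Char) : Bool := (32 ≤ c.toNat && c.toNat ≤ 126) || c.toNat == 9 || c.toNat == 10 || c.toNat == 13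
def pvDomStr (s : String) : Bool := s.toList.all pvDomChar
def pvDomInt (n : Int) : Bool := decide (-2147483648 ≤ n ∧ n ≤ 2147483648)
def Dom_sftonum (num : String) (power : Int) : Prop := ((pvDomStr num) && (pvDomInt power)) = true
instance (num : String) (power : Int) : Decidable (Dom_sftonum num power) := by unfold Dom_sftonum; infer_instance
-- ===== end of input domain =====

-- B keeps A's cleaning phase but replaces the six-way power/length case analysis
-- by one decimal-position computation (objective: simpler).

-- ===== SHARED CLEANING HELPERS (these Python lines are identical in A and B) =====

-- while num.find(".") != -1 and num[-1:] == "0": num = num[:-1]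
-- (the loop drops one char per step, so `length` steps of fuel are enough)
def pvTrimGo : Nat → List Char → List Char
  | 0, cs => cs
  | fuel + 1, cs =>
      if PySem.Chars.find cs ['.'] ≠ -1 ∧ PySem.List.slice cs (some (-1)) none = ['0'] then
        pvTrimGo fuel cs.dropLast
      else cs

-- while num[0] == "0" and num[1] != ".": num = num[1:]
-- (Python raises IndexError at num[0]/num[1] when the string is empty or runs out to a
--  single "0"; those inputs are excluded by Pre_sftonum and this total port returns the
--  string unchanged there)
def pvLstrip : List Char → List Char
  | '0' :: c :: rest => if c ≠ '.' then pvLstrip (c :: rest) else '0' :: c :: rest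
  | cs => cs

def pvClean (cs : List Char) : List Char :=
  let t1 := pvTrimGo cs.length cs
  let t2 := if PySem.List.slice t1 (some (-1)) none = ['.'] then t1.dropLast else t1
  pvLstrip t2

-- "\num{" + body + "}"
def pvWrap (body : List Char) : String := String.ofList ("\\num{".toList ++ body ++ "}".toList)

-- ===== PORT A =====
-- the branch logic of A after the cleaning phase (n is the cleaned string)
def pvBranchA (n : List Char) (power : Int) : String :=
  if power = 0 then pvWrap n
  else if 0 < power then
    if PySem.Chars.find n ['.'] = -1 then
      pvWrap (n ++ PySem.List.pyRepeat ['0'] power)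
    else
      let pointpos := PySem.Chars.find n ['.']
      let prepoint := PySem.List.slice n none (some pointpos)
      let postpoint := PySem.List.slice n (some (-(PySem.Chars.len n - pointpos - 1))) none
      if power = PySem.Chars.len postpoint then pvWrap (prepoint ++ postpoint)
      else if PySem.Chars.len postpoint < power then
        pvWrap (prepoint ++ postpoint ++ PySem.List.pyRepeat ['0'] (power - PySem.Chars.len postpoint))
      else
        let prepoint2 := prepoint ++ PySem.List.slice postpoint none (some power)
        let postpoint2 := PySem.List.slice postpoint (some (-(PySem.Chars.len postpoint - power))) none
        pvWrap (prepoint2 ++ ['.'] ++ postpoint2)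
  else
    let p := |power|
    if PySem.Chars.find n ['.'] = -1 then
      if p = PySem.Chars.len n then pvWrap ('0' :: '.' :: n)
      else if PySem.Chars.len n < p then
        pvWrap ('0' :: '.' :: (PySem.List.pyRepeat ['0'] (p - PySem.Chars.len n) ++ n))
      else
        let prepoint := PySem.List.slice n none (some (PySem.Chars.len n - p))
        let postpoint := PySem.List.slice n (some (-p)) none
        pvWrap (prepoint ++ ['.'] ++ postpoint)
    else
      let pointpos := PySem.Chars.find n ['.']
      let prepoint := PySem.List.slice n none (some pointpos)
      let postpoint := PySem.List.slice n (some (-(PySem.Chars.len n - pointpos - 1))) none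
      if p = PySem.Chars.len prepoint then pvWrap ('0' :: '.' :: (prepoint ++ postpoint))
      else if PySem.Chars.len prepoint < p then
        pvWrap ('0' :: '.' :: (PySem.List.pyRepeat ['0'] (p - PySem.Chars.len prepoint) ++ prepoint ++ postpoint))
      else
        let postpoint2 := PySem.List.slice prepoint (some (-p)) none ++ postpoint
        let prepoint2 := PySem.List.slice prepoint none (some (PySem.Chars.len prepoint - p))
        pvWrap (prepoint2 ++ ['.'] ++ postpoint2)

def sftonum (num : String) (power : Int) : String :=
  if num == "0" then "0" else pvBranchA (pvClean num.toList) power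

-- ===== PORT B =====
-- B: one decimal-position computation (Source B)
def pvBranchB (n : List Char) (power : Int) : String :=
  if power = 0 then pvWrap n
  else
    let dot := PySem.Chars.find n ['.']
    let pre := if dot = -1 then n else PySem.List.slice n none (some dot)
    let post := if dot = -1 then ([] : List Char) else PySem.List.slice n (some (dot + 1)) none
    let digits := pre ++ post
    let newpos := PySem.Chars.len pre + power
    let body :=
      if PySem.Chars.len digits ≤ newpos then
        digits ++ PySem.List.pyRepeat ['0'] (newpos - PySem.Chars.len digits)
      else if newpos ≤ 0 then
        '0' :: '.' :: (PySem.List.pyRepeat ['0'] (-newpos) ++ digits)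
      else
        PySem.List.slice digits none (some newpos) ++ ['.'] ++ PySem.List.slice digits (some newpos) none
    pvWrap body

def sftonum_alt (num : String) (power : Int) : String :=
  if num == "0" then "0" else pvBranchB (pvClean num.toList) power

-- ===== PRECONDITION & SPEC =====
-- Pre_ excludes exactly the inputs on which Python A raises IndexError: strings (other
-- than "0") made only of '0's and at most one '.', whose cleaning loop empties the
-- string or reaches a lone "0" before indexing num[1].
def Pre_sftonum (num : String) (power : Int) : Prop :=
  num = "0" ∨ ¬ (num.toList.all (fun c => c == '0' || c == '.') = true ∧ num.toList.count '.' ≤ 1)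
instance (num : String) (power : Int) : Decidable (Pre_sftonum num power) := by
  unfold Pre_sftonum; infer_instance

def pvWitness_sftonum : String × Int := ("12.5", 2)

-- On inputs whose first '.' ends the cleaned string (num = dot-free text, then "..",
-- then trailing zeros) with power ≠ 0, A's slice num[-(0):] wraps around to the whole
-- string, so A duplicates the digits and keeps stray dots (A "1.." 1 = "\num{11..}"),
-- while B treats the text after the first dot as the fraction part and returns
-- "\num{10}", the intended decimal shift.
def D_sftonum (num : String) (power : Int) : Prop :=
  power ≠ 0 ∧
    (num.toList.reverse.dropWhile (· == '0')).take 2 = ['.', '.'] ∧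
    '.' ∉ (num.toList.reverse.dropWhile (· == '0')).drop 2
instance (num : String) (power : Int) : Decidable (D_sftonum num power) := by
  unfold D_sftonum; infer_instance

def Spec_sftonum (num : String) (power : Int) (out : String) : Prop :=
  ¬ D_sftonum num power → out = sftonum_alt num power
instance (num : String) (power : Int) (out : String) : Decidable (Spec_sftonum num power out) := by
  unfold Spec_sftonum; infer_instance

def pvDiffWitness_sftonum : String × Int := ("1..", 1)
def pvDiffWitnessOut_sftonum : String × String := ("\\num{11..}", "\\num{10}")

-- ===== CLAIM (what is proved, stated in full; the proofs are below) =====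
def Claim_unchanged_sftonum : Prop := ∀ (num : String) (power : Int), Dom_sftonum num power → Pre_sftonum num power → Spec_sftonum num power (sftonum num power)
def Claim_exact_sftonum : Prop := ∀ (num : String) (power : Int), Dom_sftonum num power → Pre_sftonum num power → D_sftonum num power → sftonum num power ≠ sftonum_alt num power
def Claim_changed_sftonum : Prop := Dom_sftonum (pvDiffWitness_sftonum.1) (pvDiffWitness_sftonum.2) ∧ Pre_sftonum (pvDiffWitness_sftonum.1) (pvDiffWitness_sftonum.2) ∧ D_sftonum (pvDiffWitness_sftonum.1) (pvDiffWitness_sftonum.2) ∧ sftonum (pvDiffWitness_sftonum.1) (pvDiffWitness_sftonum.2) = pvDiffWitnessOut_sftonum.1 ∧ sftonum_alt (pvDiffWitness_sftonum.1) (pvDiffWitness_sftonum.2) = pvDiffWitnessOut_sftonum.2 ∧ pvDiffWitnessOut_sftonum.1 ≠ pvDiffWitnessOut_sftonum.2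

-- ===== LEMMAS AND PROOFS =====

-- "the cleaned string is a dot-free block followed by a final '.'"
def pvEndsFirstDot (x : List Char) : Prop := ∃ u : List Char, '.' ∉ u ∧ x = u ++ ['.']

theorem pvSliceLast (cs : List Char) (a : Char) :
    PySem.List.slice (cs ++ [a]) (some (-1)) none = [a] := by
  rw [PySem.List.slice_from_neg_one]
  simp

theorem pvSliceFromNeg (xs : List Char) (a : Int) (h1 : a < 0) :
    PySem.List.slice xs (some a) none = xs.drop (xs.length - (-a).toNat) := by
  have hk : 0 < (-a).toNat := by omega
  have h2 := PySem.List.slice_from_neg_natCast xs (k := (-a).toNat) hk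
  rw [show (some a : Option Int) = some (-(((-a).toNat : Nat) : Int)) by congr 1; omega]
  exact h2

theorem pvFindNone (n : List Char) (h : '.' ∉ n) : PySem.Chars.find n ['.'] = -1 := by
  rw [PySem.Chars.find_eq_neg_one_iff]
  simpa [List.singleton_infix_iff] using h

theorem pvFindFirst (u v : List Char) (hu : '.' ∉ u) :
    PySem.Chars.find (u ++ '.' :: v) ['.'] = (u.length : Int) := by
  have hinf : ['.'] <:+: (u ++ '.' :: v) := by
    rw [List.singleton_infix_iff]; simp
  have h0 : 0 ≤ PySem.Chars.find (u ++ '.' :: v) ['.'] :=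
    (PySem.Chars.find_nonneg_iff _ _).mpr hinf
  obtain ⟨hpre, hmin⟩ := PySem.Chars.find_spec h0
  set k := (PySem.Chars.find (u ++ '.' :: v) ['.']).toNat with hk
  have hle : k ≤ u.length := by
    by_contra hgt
    exact hmin u.length (by omega) ⟨v, by rw [List.drop_left, List.singleton_append]⟩
  have hge : ¬ k < u.length := by
    intro hlt
    have hd : (u ++ '.' :: v).drop k = u.drop k ++ '.' :: v :=
      List.drop_append_of_le_length (by omega)
    rcases hpre with ⟨t, ht⟩
    rw [hd] at ht
    have hne : u.drop k ≠ [] := by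
      intro hnil
      have := congrArg List.length hnil
      simp at this
      omega
    obtain ⟨c, rest, hcr⟩ := List.exists_cons_of_ne_nil hne
    rw [hcr] at ht
    simp at ht
    have hcu : c ∈ u := List.mem_of_mem_drop (by rw [hcr]; exact List.mem_cons_self ..)
    exact hu (ht.1 ▸ hcu)
  have hkeq : k = u.length := by omega
  omega

theorem pvLstrip_endsFirstDot (x : List Char) (h : pvEndsFirstDot (pvLstrip x)) :
    pvEndsFirstDot x := by
  revert h
  fun_induction pvLstrip x with
  | case1 c rest hne ih =>
    intro h
    obtain ⟨u, hu, he⟩ := ih h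
    refine ⟨'0' :: u, ?_, ?_⟩
    · simp only [List.mem_cons, not_or] at *
      exact ⟨by decide, hu⟩
    · simp [he]
  | case2 c rest hne =>
    intro h; exact h
  | case3 cs hcs =>
    intro h; exact h

theorem pvTrimGo_eq (fuel : Nat) (cs : List Char) (h : cs.length ≤ fuel) :
    pvTrimGo fuel cs =
      if '.' ∈ cs then (cs.reverse.dropWhile (· == '0')).reverse else cs := by
  induction fuel generalizing cs with
  | zero =>
    have : cs = [] := List.eq_nil_of_length_eq_zero (by omega)
    subst this
    simp [pvTrimGo]
  | succ f ih =>
    rw [pvTrimGo]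
    by_cases hC : PySem.Chars.find cs ['.'] ≠ -1 ∧ PySem.List.slice cs (some (-1)) none = ['0']
    · rw [if_pos hC]
      obtain ⟨h1, h2⟩ := hC
      rcases List.eq_nil_or_concat cs with rfl | ⟨ys, a, hcs⟩
      · rw [PySem.List.slice_from_neg_one] at h2; simp at h2
      · rw [List.concat_eq_append] at hcs
        subst hcs
        have ha : a = '0' := by
          have hsl := pvSliceLast ys a
          rw [hsl] at h2
          simpa using h2
        subst ha
        have hdot : '.' ∈ ys := by
          rw [Ne, PySem.Chars.find_eq_neg_one_iff, List.singleton_infix_iff, not_not] at h1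
          simpa using h1
        rw [List.dropLast_concat]
        rw [ih ys (by simp at h; omega)]
        rw [if_pos hdot, if_pos (by simp [hdot])]
        simp
    · rw [if_neg hC]
      by_cases hdot : '.' ∈ cs
      · rw [if_pos hdot]
        have h1 : PySem.Chars.find cs ['.'] ≠ -1 := by
          rw [PySem.Chars.find_ne_neg_one_iff, List.singleton_infix_iff]; exact hdot
        have h2 : PySem.List.slice cs (some (-1)) none ≠ ['0'] := by tauto
        rcases List.eq_nil_or_concat cs with rfl | ⟨ys, a, hcs⟩
        · simp at hdot
        · rw [List.concat_eq_append] at hcs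
          subst hcs
          have ha : ¬ (a == '0') = true := by
            intro hc
            have ha0 : a = '0' := by simpa using hc
            subst ha0
            exact h2 (pvSliceLast ys '0')
          simp [ha]
      · rw [if_neg hdot]

theorem pvClean_endsFirstDot (num : String) (h : pvEndsFirstDot (pvClean num.toList)) :
    (num.toList.reverse.dropWhile (· == '0')).take 2 = ['.', '.'] ∧
      '.' ∉ (num.toList.reverse.dropWhile (· == '0')).drop 2 := by
  simp only [pvClean] at h
  have h2 := pvLstrip_endsFirstDot _ h
  set t1 := pvTrimGo num.toList.length num.toList with ht1
  have hE1 : ∃ u, '.' ∉ u ∧ t1 = u ++ ['.', '.'] := by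
    by_cases hc : PySem.List.slice t1 (some (-1)) none = ['.']
    · rw [if_pos hc] at h2
      obtain ⟨u, hu, he⟩ := h2
      rcases List.eq_nil_or_concat t1 with hnil | ⟨ys, a, hys⟩
      · rw [hnil, PySem.List.slice_from_neg_one] at hc; simp at hc
      · rw [List.concat_eq_append] at hys
        have ha : a = '.' := by
          have hsl := pvSliceLast ys a
          rw [hys, hsl] at hc
          simpa using hc
        subst ha
        rw [hys, List.dropLast_concat] at he
        exact ⟨u, hu, by rw [hys, he]; simp⟩
    · rw [if_neg hc] at h2
      obtain ⟨u, hu, he⟩ := h2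
      exact absurd (by rw [he]; exact pvSliceLast u '.') hc
  obtain ⟨u, hu, he⟩ := hE1
  rw [ht1, pvTrimGo_eq _ _ le_rfl] at he
  by_cases hdot : '.' ∈ num.toList
  · rw [if_pos hdot] at he
    have hr : num.toList.reverse.dropWhile (· == '0') = '.' :: '.' :: u.reverse := by
      have := congrArg List.reverse he
      simpa using this
    rw [hr]
    refine ⟨rfl, ?_⟩
    simpa using hu
  · rw [if_neg hdot] at he
    exact absurd (by rw [he]; simp : '.' ∈ num.toList) hdot

theorem pvSplitFirst (n : List Char) (h : '.' ∈ n) :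
    n = (n.takeWhile (fun c => !(c == '.'))) ++ '.' :: (n.dropWhile (fun c => !(c == '.'))).tail := by
  induction n with
  | nil => simp at h
  | cons c cs ih =>
    by_cases hc : c = '.'
    · subst hc; simp
    · have hcs : '.' ∈ cs := by
        rcases List.mem_cons.mp h with h' | h'
        · exact absurd h'.symm hc
        · exact h'
      simp only [List.takeWhile_cons, List.dropWhile_cons, show (!(c == '.')) = true by simpa using hc,
        if_true]
      exact congrArg (c :: ·) (ih hcs)

theorem pvBranch_eq (n : List Char) (power : Int)
    (hE : power ≠ 0 → ¬ pvEndsFirstDot n) : pvBranchA n power = pvBranchB n power := by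
  by_cases hp0 : power = 0
  · subst hp0; simp [pvBranchA, pvBranchB]
  have hE' := hE hp0
  by_cases hdot : '.' ∈ n
  case neg =>
    -- no dot in the cleaned string
    have hf : PySem.Chars.find n ['.'] = -1 := pvFindNone n hdot
    simp only [pvBranchA, pvBranchB, if_neg hp0, if_pos hf, List.append_nil,
      PySem.Chars.len_eq]
    rcases lt_trichotomy power 0 with hneg | rfl | hpos
    · -- power < 0
      simp only [if_neg (show ¬ (0:Int) < power by omega), abs_of_neg hneg, neg_neg,
        if_neg (show ¬ ((n.length : Int) ≤ (n.length : Int) + power) by omega)]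
      rcases lt_trichotomy (-power) ((n.length : Int)) with h1 | h1 | h1
      · -- |power| < len n  → split inside
        simp only [if_neg (show ¬ (-power = (n.length : Int)) by omega),
          if_neg (show ¬ ((n.length : Int) < -power) by omega),
          if_neg (show ¬ ((n.length : Int) + power ≤ 0) by omega)]
        rw [PySem.List.slice_to _ (show (0:Int) ≤ (n.length : Int) - -power by omega),
          PySem.List.slice_to _ (show (0:Int) ≤ (n.length : Int) + power by omega),
          pvSliceFromNeg _ power (by omega),
          PySem.List.slice_from _ (show (0:Int) ≤ (n.length : Int) + power by omega)]
        rw [show ((n.length : Int) - -power).toNat = ((n.length : Int) + power).toNat by omega]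
        rw [show n.length - (-power).toNat = ((n.length : Int) + power).toNat by omega]
      · -- |power| = len n
        simp only [if_pos (show -power = (n.length : Int) from h1),
          if_pos (show (n.length : Int) + power ≤ 0 by omega)]
        rw [PySem.List.pyRepeat_singleton,
          show (-((n.length : Int) + power)).toNat = 0 by omega]
        simp
      · -- len n < |power|
        simp only [if_neg (show ¬ (-power = (n.length : Int)) by omega),
          if_pos (show (n.length : Int) < -power by omega),
          if_pos (show (n.length : Int) + power ≤ 0 by omega)]
        rw [PySem.List.pyRepeat_singleton, PySem.List.pyRepeat_singleton]
        rw [show (-((n.length : Int) + power)).toNat = (-power - (n.length : Int)).toNat by omega]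
    · exact absurd rfl hp0
    · -- 0 < power
      simp only [if_pos hpos,
        if_pos (show (n.length : Int) ≤ (n.length : Int) + power by omega)]
      rw [show (n.length : Int) + power - (n.length : Int) = power by ring]
  case pos =>
    -- n = u ++ '.' :: v with '.' ∉ u, v ≠ []
    have hsplit0 := pvSplitFirst n hdot
    set u := n.takeWhile (fun c => !(c == '.')) with hudef
    set v := (n.dropWhile (fun c => !(c == '.'))).tail with hvdef
    have hsplit : n = u ++ '.' :: v := hsplit0
    have hu : '.' ∉ u := by
      intro hmem
      have := List.mem_takeWhile_imp hmem
      simp at this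
    have hv : v ≠ [] := by
      intro hnil
      exact hE' ⟨u, hu, by rw [hsplit, hnil]⟩
    have hvl : 0 < v.length := List.length_pos_of_ne_nil hv
    have hfind : PySem.Chars.find n ['.'] = (u.length : Int) := by
      rw [hsplit]; exact pvFindFirst u v hu
    have hfne : ¬ (PySem.Chars.find n ['.'] = -1) := by rw [hfind]; omega
    have hlen : n.length = u.length + 1 + v.length := by
      rw [hsplit]; simp; omega
    have hpre_eq : PySem.List.slice n none (some ((u.length : Nat) : Int)) = u := by
      rw [PySem.List.slice_to_natCast, hsplit, List.take_left]
    have hsplit' : n = (u ++ ['.']) ++ v := by rw [hsplit]; simp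
    have hdrop1 : n.drop (u.length + 1) = v := by
      rw [hsplit', show u.length + 1 = (u ++ ['.']).length by simp, List.drop_left]
    have hpost_eq :
        PySem.List.slice n (some (-(PySem.Chars.len n - ((u.length : Nat) : Int) - 1))) none = v := by
      rw [show -(PySem.Chars.len n - ((u.length : Nat) : Int) - 1) = -((v.length : Nat) : Int) by
        simp only [PySem.Chars.len_eq]; omega]
      rw [PySem.List.slice_from_neg_natCast _ _ hvl]
      rw [show n.length - v.length = u.length + 1 by omega]
      exact hdrop1
    have hpostB_eq : PySem.List.slice n (some (((u.length : Nat) : Int) + 1)) none = v := by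
      rw [show ((u.length : Nat) : Int) + 1 = (((u.length + 1 : Nat)) : Int) by push_cast; ring]
      rw [PySem.List.slice_from_natCast]
      exact hdrop1
    simp only [pvBranchA, pvBranchB, if_neg hp0, if_neg hfne]
    simp only [hfind]
    simp only [hpre_eq, hpost_eq, hpostB_eq]
    simp only [PySem.Chars.len_eq, List.length_append, Nat.cast_add]
    rcases lt_trichotomy power 0 with hneg | rfl | hpos
    · -- power < 0
      simp only [if_neg (show ¬ (0:Int) < power by omega), abs_of_neg hneg, neg_neg,
        if_neg (show ¬ ((u.length : Int) + (v.length : Int) ≤ (u.length : Int) + power) by omega)]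
      rcases lt_trichotomy (-power) ((u.length : Int)) with h1 | h1 | h1
      · -- |power| < len prepoint
        simp only [if_neg (show ¬ (-power = (u.length : Int)) by omega),
          if_neg (show ¬ ((u.length : Int) < -power) by omega),
          if_neg (show ¬ ((u.length : Int) + power ≤ 0) by omega)]
        rw [PySem.List.slice_to _ (show (0:Int) ≤ (u.length : Int) - -power by omega),
          PySem.List.slice_to _ (show (0:Int) ≤ (u.length : Int) + power by omega),
          pvSliceFromNeg _ power (by omega),
          PySem.List.slice_from _ (show (0:Int) ≤ (u.length : Int) + power by omega)]
        rw [show ((u.length : Int) - -power).toNat = ((u.length : Int) + power).toNat by omega]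
        rw [show u.length - (-power).toNat = ((u.length : Int) + power).toNat by omega]
        rw [List.take_append_of_le_length (by omega), List.drop_append_of_le_length (by omega)]
      · -- |power| = len prepoint
        simp only [if_pos (show -power = (u.length : Int) from h1),
          if_pos (show (u.length : Int) + power ≤ 0 by omega)]
        rw [PySem.List.pyRepeat_singleton,
          show (-((u.length : Int) + power)).toNat = 0 by omega]
        simp
      · -- |power| > len prepoint
        simp only [if_neg (show ¬ (-power = (u.length : Int)) by omega),
          if_pos (show (u.length : Int) < -power by omega),
          if_pos (show (u.length : Int) + power ≤ 0 by omega)]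
        rw [PySem.List.pyRepeat_singleton, PySem.List.pyRepeat_singleton]
        rw [show (-((u.length : Int) + power)).toNat = (-power - (u.length : Int)).toNat by omega]
        simp [List.append_assoc]
    · exact absurd rfl hp0
    · -- 0 < power
      simp only [if_pos hpos]
      rcases lt_trichotomy power ((v.length : Int)) with h1 | h1 | h1
      · -- power < len postpoint
        simp only [if_neg (show ¬ (power = (v.length : Int)) by omega),
          if_neg (show ¬ ((v.length : Int) < power) by omega),
          if_neg (show ¬ ((u.length : Int) + (v.length : Int) ≤ (u.length : Int) + power) by omega),
          if_neg (show ¬ ((u.length : Int) + power ≤ 0) by omega)]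
        rw [PySem.List.slice_to _ (show (0:Int) ≤ power by omega),
          PySem.List.slice_to _ (show (0:Int) ≤ (u.length : Int) + power by omega),
          pvSliceFromNeg _ (-((v.length : Int) - power)) (by omega),
          PySem.List.slice_from _ (show (0:Int) ≤ (u.length : Int) + power by omega)]
        rw [show ((u.length : Int) + power).toNat = u.length + power.toNat by omega]
        rw [List.take_length_add_append, List.drop_length_add_append]
        rw [show v.length - (- -((v.length : Int) - power)).toNat = power.toNat by omega]
      · -- power = len postpoint
        simp only [if_pos (show power = (v.length : Int) from h1),
          if_pos (show (u.length : Int) + (v.length : Int) ≤ (u.length : Int) + power by omega)]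
        rw [PySem.List.pyRepeat_singleton,
          show ((u.length : Int) + power - ((u.length : Int) + (v.length : Int))).toNat = 0 by omega]
        simp
      · -- power > len postpoint
        simp only [if_neg (show ¬ (power = (v.length : Int)) by omega),
          if_pos (show (v.length : Int) < power by omega),
          if_pos (show (u.length : Int) + (v.length : Int) ≤ (u.length : Int) + power by omega)]
        rw [PySem.List.pyRepeat_singleton, PySem.List.pyRepeat_singleton]
        rw [show ((u.length : Int) + power - ((u.length : Int) + (v.length : Int))).toNat
              = (power - (v.length : Int)).toNat by omega]

theorem pvLstrip_endsFirstDot' (x : List Char) (h : pvEndsFirstDot x) :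
    pvEndsFirstDot (pvLstrip x) := by
  fun_induction pvLstrip x with
  | case1 c rest hne ih =>
    apply ih
    obtain ⟨u, hu, he⟩ := h
    match u, he with
    | a :: u', he =>
      simp only [List.cons_append, List.cons.injEq] at he
      exact ⟨u', fun hm => hu (List.mem_cons_of_mem _ hm), he.2⟩
  | case2 c rest hne => exact h
  | case3 cs hcs => exact h

theorem pvShape_to_E (num : String)
    (h1 : (num.toList.reverse.dropWhile (· == '0')).take 2 = ['.', '.'])
    (h2 : '.' ∉ (num.toList.reverse.dropWhile (· == '0')).drop 2) :
    pvEndsFirstDot (pvClean num.toList) := by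
  set r := num.toList.reverse.dropWhile (· == '0') with hr0
  have hdotr : '.' ∈ r := List.mem_of_mem_take (by rw [h1]; simp)
  have hdotnum : '.' ∈ num.toList := by
    rw [← List.mem_reverse]
    exact List.Sublist.mem hdotr (List.dropWhile_sublist _)
  have hr : r = '.' :: '.' :: r.drop 2 := by
    conv_lhs => rw [← List.take_append_drop 2 r]
    rw [h1]
    rfl
  simp only [pvClean]
  rw [pvTrimGo_eq _ _ le_rfl, if_pos hdotnum, ← hr0, hr]
  have hrw : (('.' :: '.' :: r.drop 2).reverse : List Char)
      = ((r.drop 2).reverse ++ ['.']) ++ ['.'] := by simp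
  rw [hrw, if_pos (pvSliceLast _ _), List.dropLast_concat]
  refine pvLstrip_endsFirstDot' _ ⟨(r.drop 2).reverse, ?_, rfl⟩
  simpa using h2

theorem pvBranch_ne (u : List Char) (power : Int) (hu : '.' ∉ u) (hp0 : power ≠ 0) :
    pvBranchA (u ++ ['.']) power ≠ pvBranchB (u ++ ['.']) power := by
  set n := u ++ ['.'] with hn
  have hfind : PySem.Chars.find n ['.'] = (u.length : Int) := pvFindFirst u [] hu
  have hfne : ¬ (PySem.Chars.find n ['.'] = -1) := by rw [hfind]; omega
  have hlen : n.length = u.length + 1 := by rw [hn]; simp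
  have hpre_eq : PySem.List.slice n none (some ((u.length : Nat) : Int)) = u := by
    rw [PySem.List.slice_to_natCast, hn, List.take_left]
  have hpost_eq :
      PySem.List.slice n (some (-(PySem.Chars.len n - ((u.length : Nat) : Int) - 1))) none = n := by
    rw [show -(PySem.Chars.len n - ((u.length : Nat) : Int) - 1) = ((0 : Nat) : Int) by
      simp only [PySem.Chars.len_eq, hlen]; push_cast; ring]
    rw [PySem.List.slice_from_natCast, List.drop_zero]
  have hpostB_eq : PySem.List.slice n (some (((u.length : Nat) : Int) + 1)) none = [] := by
    rw [show ((u.length : Nat) : Int) + 1 = (((u.length + 1 : Nat)) : Int) by push_cast; ring]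
    rw [PySem.List.slice_from_natCast, hn]
    simp
  have hcu : u.count '.' = 0 := by rw [List.count_eq_zero]; exact hu
  have hcn : n.count '.' = 1 := by rw [hn]; simp [List.count_append, hcu]
  have hrep : ∀ k : Nat, (List.replicate k '0').count '.' = 0 := fun k => by
    rw [List.count_eq_zero]
    intro hm
    exact absurd (List.mem_replicate.mp hm).2 (by decide)
  simp only [pvBranchA, pvBranchB, if_neg hp0, if_neg hfne]
  simp only [hfind]
  simp only [hpre_eq, hpost_eq, hpostB_eq]
  simp only [PySem.Chars.len_eq, List.append_nil, hlen, Nat.cast_add, Nat.cast_one,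
    PySem.List.pyRepeat_singleton]
  rcases lt_trichotomy power 0 with hneg | rfl | hpos
  · -- power < 0
    simp only [if_neg (show ¬ (0:Int) < power by omega), abs_of_neg hneg, neg_neg,
      if_neg (show ¬ ((u.length : Int) ≤ (u.length : Int) + power) by omega)]
    rcases lt_trichotomy (-power) ((u.length : Int)) with h1 | h1 | h1
    · -- |power| < len prepoint
      simp only [if_neg (show ¬ (-power = (u.length : Int)) by omega),
        if_neg (show ¬ ((u.length : Int) < -power) by omega),
        if_neg (show ¬ ((u.length : Int) + power ≤ 0) by omega)]
      rw [PySem.List.slice_to _ (show (0:Int) ≤ (u.length : Int) + power by omega),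
        PySem.List.slice_from _ (show (0:Int) ≤ (u.length : Int) + power by omega)]
      intro heq
      have hc := congrArg (fun s => s.toList.count '.') heq
      simp only [pvWrap, String.toList_ofList, List.count_append] at hc
      have h3 : (u.take ((u.length : Int) + power).toNat).count '.' = 0 := by
        rw [List.count_eq_zero]; exact fun hm => hu (List.mem_of_mem_take hm)
      have h4 : (u.drop ((u.length : Int) + power).toNat).count '.' = 0 := by
        rw [List.count_eq_zero]; exact fun hm => hu (List.mem_of_mem_drop hm)
      simp only [hcn, h3, h4] at hc
      omega
    · -- |power| = len prepoint
      simp only [if_pos (show -power = (u.length : Int) from h1),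
        if_pos (show (u.length : Int) + power ≤ 0 by omega)]
      intro heq
      have hc := congrArg (fun s => s.toList.count '.') heq
      simp only [pvWrap, String.toList_ofList, List.count_append, List.count_cons] at hc
      simp only [hcn, hcu, hrep] at hc
      simp at hc
    · -- |power| > len prepoint
      simp only [if_neg (show ¬ (-power = (u.length : Int)) by omega),
        if_pos (show (u.length : Int) < -power by omega),
        if_pos (show (u.length : Int) + power ≤ 0 by omega)]
      intro heq
      have hc := congrArg (fun s => s.toList.count '.') heq
      simp only [pvWrap, String.toList_ofList, List.count_append, List.count_cons] at hc
      simp only [hcn, hcu, hrep] at hc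
      simp at hc
  · exact absurd rfl hp0
  · -- 0 < power
    simp only [if_pos hpos,
      if_pos (show (u.length : Int) ≤ (u.length : Int) + power by omega)]
    rcases lt_trichotomy power ((u.length : Int) + 1) with h1 | h1 | h1
    · -- power < len postpoint
      simp only [if_neg (show ¬ (power = (u.length : Int) + 1) by omega),
        if_neg (show ¬ ((u.length : Int) + 1 < power) by omega)]
      intro heq
      have hc := congrArg (fun s => s.toList.count '.') heq
      simp only [pvWrap, String.toList_ofList, List.count_append, List.count_cons] at hc
      simp only [hcu, hrep] at hc
      simp at hc
    · -- power = len postpoint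
      simp only [if_pos (show power = (u.length : Int) + 1 from h1)]
      intro heq
      have hc := congrArg (fun s => s.toList.count '.') heq
      simp only [pvWrap, String.toList_ofList, List.count_append] at hc
      simp only [hcn, hcu, hrep] at hc
      omega
    · -- power > len postpoint
      simp only [if_neg (show ¬ (power = (u.length : Int) + 1) by omega),
        if_pos (show (u.length : Int) + 1 < power by omega)]
      intro heq
      have hc := congrArg (fun s => s.toList.count '.') heq
      simp only [pvWrap, String.toList_ofList, List.count_append] at hc
      simp only [hcn, hcu, hrep] at hc
      omega

-- ===== VERDICT (by name: the statement is the Claim_ definition above) =====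
theorem sftonum_spec : Claim_unchanged_sftonum := by
  intro num power _hDom _hPre hnD
  show sftonum num power = sftonum_alt num power
  rw [sftonum, sftonum_alt]
  by_cases hz : num == "0"
  · rw [if_pos hz, if_pos hz]
  · rw [if_neg hz, if_neg hz]
    refine pvBranch_eq _ _ ?_
    intro hp hEnds
    exact hnD ⟨hp, pvClean_endsFirstDot num hEnds⟩

theorem sftonum_changed : Claim_changed_sftonum := by
  unfold Claim_changed_sftonum; decide

theorem sftonum_tight : Claim_exact_sftonum := by
  intro num power _hDom _hPre hD
  obtain ⟨hp, hsh1, hsh2⟩ := hD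
  have hE : pvEndsFirstDot (pvClean num.toList) := pvShape_to_E num hsh1 hsh2
  have hz : ¬ (num == "0") = true := by
    intro hbeq
    have hnum : num = "0" := by simpa using hbeq
    subst hnum
    exact absurd hsh1 (by decide)
  rw [sftonum, sftonum_alt, if_neg hz, if_neg hz]
  obtain ⟨u, hu, he⟩ := hE
  rw [he]
  exact pvBranch_ne u power hu hp
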